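-- pv_equiv track=rewrite | github.com/ben-128/BaB-GameplayPatch | WIP/level_design/extract_spawn_groups.py | assign_floor
-- ===== SOURCE A (Python) =====
-- def assign_floor(group_offset, level):
--     """Determine floor number based on level string positions."""
--     strings = level.get('strings', [])
--     if not strings:
--         return 0
--
--     floor = 0
--     for s_pos in sorted(strings):
--         if group_offset > s_pos:
--             floor += 1
--
--     return floor
-- ===== SOURCE B (Python) =====
-- def assign_floor(group_offset, level):
--     """Determine floor number based on level string positions."""
--     strings = sorted(level.get('strings', []))
--     lo, hi = 0, len(strings)
--     while lo < hi:
--         mid = (lo + hi) // 2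
--         if strings[mid] < group_offset:
--             lo = mid + 1
--         else:
--             hi = mid
--     return lo
-- ===== Notes on version B (the rewrite author's own statement) =====
-- stated objective: alternative
-- what changed: Replaces the linear counting loop over the sorted positions with a hand-written bisect_left binary search on the sorted list (lo/hi halving), returning lo directly; the empty case falls out of lo=hi=0 with no guard.
import Mathlib
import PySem

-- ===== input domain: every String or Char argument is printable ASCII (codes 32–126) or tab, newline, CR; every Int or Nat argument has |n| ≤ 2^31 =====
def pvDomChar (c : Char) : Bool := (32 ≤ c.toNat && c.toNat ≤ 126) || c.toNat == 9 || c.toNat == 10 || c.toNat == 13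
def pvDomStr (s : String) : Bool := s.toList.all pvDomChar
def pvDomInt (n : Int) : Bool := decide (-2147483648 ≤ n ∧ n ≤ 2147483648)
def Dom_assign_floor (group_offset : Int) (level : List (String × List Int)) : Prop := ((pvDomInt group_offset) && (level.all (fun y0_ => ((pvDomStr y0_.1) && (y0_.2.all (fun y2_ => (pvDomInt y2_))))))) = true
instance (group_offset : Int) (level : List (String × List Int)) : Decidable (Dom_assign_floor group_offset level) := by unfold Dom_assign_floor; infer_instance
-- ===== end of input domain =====

-- B replaces A's linear counting loop over the sorted positions with a hand-written
-- bisect_left binary search on the same sorted list (alternative algorithm, same overall cost).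

-- ===== PORT A =====
def assign_floor (group_offset : Int) (level : List (String × List Int)) : Int :=
  let strings := PySem.Dict.getD (PySem.Dict.ofList level) "strings" []
  if strings = [] then 0
  else
    (PySem.List.sorted strings (fun x => x) false).foldl
      (fun floor s_pos => if group_offset > s_pos then floor + 1 else floor) 0

-- ===== PORT B =====
-- while lo < hi: mid = (lo+hi)//2; … — lo, hi are Nat indices (always ≥ 0 in the Python);
-- strings[mid] is List.getD (mid is always in range, so the default is never read);
-- fuel (initially hi - lo = length) only makes the recursion structural: each step shrinks hi - lo
def bisectLoop (s : List Int) (x : Int) : Nat → Nat → Nat → Nat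
  | 0, lo, _ => lo
  | fuel + 1, lo, hi =>
    if lo < hi then
      let mid := (lo + hi) / 2
      if s.getD mid 0 < x then bisectLoop s x fuel (mid + 1) hi
      else bisectLoop s x fuel lo mid
    else lo

def assign_floor_alt (group_offset : Int) (level : List (String × List Int)) : Int :=
  let strings := PySem.List.sorted (PySem.Dict.getD (PySem.Dict.ofList level) "strings" []) (fun x => x) false
  (bisectLoop strings group_offset strings.length 0 strings.length : Int)

-- ===== PRECONDITION & SPEC =====
def Spec_assign_floor (group_offset : Int) (level : List (String × List Int)) (out : Int) : Prop := out = assign_floor_alt group_offset level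
instance (group_offset : Int) (level : List (String × List Int)) (out : Int) : Decidable (Spec_assign_floor group_offset level out) := by unfold Spec_assign_floor; infer_instance

-- ===== CLAIM (what is proved, stated in full; the proofs are below) =====
def Claim_equal_assign_floor : Prop := ∀ (group_offset : Int) (level : List (String × List Int)), Dom_assign_floor group_offset level → Spec_assign_floor group_offset level (assign_floor group_offset level)

-- ===== LEMMAS AND PROOFS =====

-- A's loop is a count of elements below x
lemma foldl_count (x : Int) (l : List Int) (c : Int) :
    l.foldl (fun floor s_pos => if x > s_pos then floor + 1 else floor) c
      = c + (l.countP (fun a => decide (a < x)) : Int) := by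
  induction l generalizing c with
  | nil => simp
  | cons a t ih =>
    simp only [List.foldl_cons, List.countP_cons, ih]
    split_ifs with h <;> simp_all <;> omega

-- a prefix of all-true and a suffix of all-false pins down countP
lemma countP_split (x : Int) (t : List Int) (k : Nat) (hk : k ≤ t.length)
    (h1 : ∀ i (h : i < t.length), i < k → t[i] < x)
    (h2 : ∀ i (h : i < t.length), k ≤ i → ¬ t[i] < x) :
    t.countP (fun a => decide (a < x)) = k := by
  induction t generalizing k with
  | nil => simp at hk ⊢; omega
  | cons a tl ih =>
    cases k with
    | zero =>
      have : ∀ b ∈ a :: tl, ¬ (decide (b < x) = true) := by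
        intro b hb
        obtain ⟨i, hi, rfl⟩ := List.mem_iff_getElem.mp hb
        simpa using h2 i hi (Nat.zero_le i)
      simpa using List.countP_eq_zero.mpr this
    | succ k' =>
      have ha : a < x := h1 0 (by simp) (Nat.succ_pos k')
      have : tl.countP (fun a => decide (a < x)) = k' := by
        apply ih k' (by simpa using hk)
        · intro i hi hik
          have := h1 (i + 1) (by simpa using Nat.succ_lt_succ hi) (Nat.succ_lt_succ hik)
          simpa using this
        · intro i hi hik
          have := h2 (i + 1) (by simpa using Nat.succ_lt_succ hi) (Nat.succ_le_succ hik)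
          simpa using this
      simp [ha, this]

-- the binary search maintains: everything before lo is < x, everything from hi on is ≥ x
lemma bisect_count (x : Int) (t : List Int)
    (hsort : ∀ p q (hp : p < t.length) (hq : q < t.length), p ≤ q → t[p] ≤ t[q])
    (fuel lo hi : Nat) (hfuel : hi - lo ≤ fuel) (hlohi : lo ≤ hi) (hhile : hi ≤ t.length)
    (hlo : ∀ i (h : i < t.length), i < lo → t[i] < x)
    (hhi : ∀ i (h : i < t.length), hi ≤ i → ¬ t[i] < x) :
    bisectLoop t x fuel lo hi = t.countP (fun a => decide (a < x)) := by
  induction fuel generalizing lo hi with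
  | zero =>
    have hk : lo = hi := by omega
    subst hk
    simpa [bisectLoop] using (countP_split x t lo (by omega) hlo hhi).symm
  | succ fuel ih =>
    rw [bisectLoop]
    split
    · next h =>
      have hmidlt : (lo + hi) / 2 < hi := by omega
      have hmidlen : (lo + hi) / 2 < t.length := by omega
      have hget : t.getD ((lo + hi) / 2) 0 = t[(lo + hi) / 2] := List.getD_eq_getElem t 0 hmidlen
      simp only [hget]
      split
      · next hm =>
        exact ih ((lo + hi) / 2 + 1) hi (by omega) (by omega) hhile
          (fun i hi' hik => lt_of_le_of_lt (hsort i ((lo + hi) / 2) hi' hmidlen (by omega)) hm)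
          hhi
      · next hm =>
        exact ih lo ((lo + hi) / 2) (by omega) (by omega) (by omega)
          hlo
          (fun i hi' hik => fun hlt => hm (lt_of_le_of_lt (hsort ((lo + hi) / 2) i hmidlen hi' hik) hlt))
    · next h =>
      have hk : lo = hi := by omega
      subst hk
      exact (countP_split x t lo (by omega) hlo hhi).symm

-- ===== VERDICT (by name: the statement is the Claim_ definition above) =====
theorem assign_floor_spec : Claim_equal_assign_floor := by
  intro group_offset level _
  unfold Spec_assign_floor assign_floor assign_floor_alt
  set s := PySem.Dict.getD (PySem.Dict.ofList level) "strings" ([] : List Int) with hs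
  set t := PySem.List.sorted s (fun x => x) false with ht
  have hsort : ∀ p q (hp : p < t.length) (hq : q < t.length), p ≤ q → t[p] ≤ t[q] := by
    intro p q hp hq hpq
    exact PySem.List.sorted_id_getElem_mono s hpq hq
  have hb : bisectLoop t group_offset t.length 0 t.length
      = t.countP (fun a => decide (a < group_offset)) :=
    bisect_count group_offset t hsort t.length 0 t.length (by omega) (Nat.zero_le _) (le_refl _)
      (by omega) (by intro i h hi; omega)
  simp only [hb]
  split
  · next hnil =>
    have : t = [] := by rw [ht, hnil]; rfl
    simp [this]
  · next hnil =>
    rw [foldl_count]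
    simp [← ht]
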